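-- pv_equiv track=rewrite | github.com/conJUSTover/pSONIC | pSONIC.py | cluster_species
-- ===== SOURCE A (Python) =====
-- def cluster_species(network, spec_num, code_dict, trans_bool):
--     #if trans_bool is False, then code_dict has no purpose here
--     final_out = []
--     for i in range(len(spec_num)):
-- #        final_out.append(sorted([n for n in network if n.startswith(str(i))]))
--         final_out.append(sorted([n for n in network if n.split('_')[0] == spec_num[i]]))
--         if trans_bool:
--             #translate edge names into genes
--             new_genes = [translate_genes(k, code_dict) for k in final_out[i]]
--             final_out[i] = new_genes
--     return final_out
--
-- def translate_genes(gene, code_uncode):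
--     return code_uncode[gene]
-- ===== SOURCE B (Python) =====
-- def cluster_species(network, spec_num, code_dict, trans_bool):
--     # Single pass: bucket nodes by their species prefix, then emit one
--     # sorted (optionally translated) group per requested species.
--     buckets = {}
--     for n in network:
--         buckets.setdefault(n.split('_')[0], []).append(n)
--     out = []
--     for s in spec_num:
--         group = sorted(buckets.get(s, []))
--         if trans_bool:
--             group = [code_dict[k] for k in group]
--         out.append(group)
--     return out
-- ===== Notes on version B (the rewrite author's own statement) =====
-- stated objective: faster
-- what changed: Instead of rescanning the whole network once per species (S filter passes), B buckets every node into a dict keyed by its '_'-prefix in one pass and then sorts each requested species' bucket.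
import Mathlib
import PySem

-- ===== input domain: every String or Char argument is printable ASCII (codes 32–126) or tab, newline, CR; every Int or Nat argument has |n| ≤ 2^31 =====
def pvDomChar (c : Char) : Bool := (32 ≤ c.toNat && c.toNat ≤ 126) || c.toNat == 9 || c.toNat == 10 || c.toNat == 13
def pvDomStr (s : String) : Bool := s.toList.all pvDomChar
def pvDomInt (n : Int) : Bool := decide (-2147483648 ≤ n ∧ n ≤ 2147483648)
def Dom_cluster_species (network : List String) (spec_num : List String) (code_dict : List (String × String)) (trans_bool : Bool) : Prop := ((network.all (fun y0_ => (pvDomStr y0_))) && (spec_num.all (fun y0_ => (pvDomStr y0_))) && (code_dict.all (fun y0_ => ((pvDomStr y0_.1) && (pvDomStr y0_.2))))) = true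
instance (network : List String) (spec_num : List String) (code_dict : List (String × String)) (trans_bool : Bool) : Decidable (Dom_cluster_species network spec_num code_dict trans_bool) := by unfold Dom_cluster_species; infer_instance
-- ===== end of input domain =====

-- B replaces A's per-species rescan of the whole network by a single bucketing pass
-- over the network followed by per-species sorting (objective: faster).


-- ===== PORT A =====
-- n.split('_')[0]: split with a non-empty separator always yields a non-empty list,
-- so split? is some and index 0 is safe; headD "" is exact here.
def speciesKey (n : String) : String := ((PySem.Str.split? n "_").getD []).headD ""

-- translate_genes(gene, code_uncode) = code_uncode[gene]: first-match lookup in the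
-- association list; Python's KeyError (no match) is excluded by Pre_cluster_species,
-- so the .getD "" default is never reached on admitted inputs.
def translate_genes (gene : String) (code_uncode : List (String × String)) : String :=
  ((code_uncode.find? (fun p => p.1 == gene)).map (fun p => p.2)).getD ""

def cluster_species (network : List String) (spec_num : List String) (code_dict : List (String × String)) (trans_bool : Bool) : List (List String) :=
  (PySem.List.pyRange 0 (PySem.List.len spec_num) 1).foldl
    (fun final_out i =>
      let s := PySem.List.pyGetD spec_num i ""   -- spec_num[i], i always in range
      let group := PySem.List.sorted (network.filter (fun n => speciesKey n == s)) (fun x => x) false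
      -- 'if trans_bool: final_out[i] = new_genes' rewrites the list just appended
      final_out ++ [if trans_bool then group.map (fun k => translate_genes k code_dict) else group])
    []

-- ===== PORT B =====
def cluster_species_alt (network : List String) (spec_num : List String) (code_dict : List (String × String)) (trans_bool : Bool) : List (List String) :=
  -- buckets.setdefault(prefix, []).append(n)
  let buckets := network.foldl (fun d n => d.modify (speciesKey n) [] (fun l => l ++ [n])) (PySem.Dict.empty)
  spec_num.map (fun s =>
    let group := PySem.List.sorted (buckets.getD s []) (fun x => x) false
    if trans_bool then group.map (fun k => translate_genes k code_dict) else group)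

-- ===== PRECONDITION & SPEC =====
-- Pre_ excludes exactly the KeyError inputs: with trans_bool, every network node whose
-- '_'-prefix occurs in spec_num gets looked up in code_dict and must have a key there.
def Pre_cluster_species (network : List String) (spec_num : List String) (code_dict : List (String × String)) (trans_bool : Bool) : Prop :=
  trans_bool = true →
    ∀ n ∈ network, ((PySem.Str.split? n "_").getD []).headD "" ∈ spec_num →
      (code_dict.find? (fun p => p.1 == n)).isSome
instance (network : List String) (spec_num : List String) (code_dict : List (String × String)) (trans_bool : Bool) : Decidable (Pre_cluster_species network spec_num code_dict trans_bool) := by unfold Pre_cluster_species; infer_instance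

def pvWitness_cluster_species : List String × List String × (List (String × String)) × Bool :=
  (["1_a", "0_b", "1_c"], ["0", "1"], [("1_a", "geneA"), ("0_b", "geneB"), ("1_c", "geneC")], true)

def Spec_cluster_species (network : List String) (spec_num : List String) (code_dict : List (String × String)) (trans_bool : Bool) (out : List (List String)) : Prop := out = cluster_species_alt network spec_num code_dict trans_bool
instance (network : List String) (spec_num : List String) (code_dict : List (String × String)) (trans_bool : Bool) (out : List (List String)) : Decidable (Spec_cluster_species network spec_num code_dict trans_bool out) := by unfold Spec_cluster_species; infer_instance

-- ===== CLAIM (what is proved, stated in full; the proofs are below) =====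
def Claim_equal_cluster_species : Prop := ∀ (network : List String) (spec_num : List String) (code_dict : List (String × String)) (trans_bool : Bool), Dom_cluster_species network spec_num code_dict trans_bool → Pre_cluster_species network spec_num code_dict trans_bool → Spec_cluster_species network spec_num code_dict trans_bool (cluster_species network spec_num code_dict trans_bool)

-- ===== LEMMAS AND PROOFS =====

-- B's bucket for species s holds exactly A's filter of the network, in network order.
theorem bucket_getD (network : List String) (s : String) :
    (network.foldl (fun d n => d.modify (speciesKey n) [] (fun l => l ++ [n]))
      (PySem.Dict.empty : PySem.Dict String (List String))).getD s []
      = network.filter (fun n => speciesKey n == s) := by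
  have h := PySem.Dict.getD_foldl_modify_append
    (network.map (fun n => (speciesKey n, n)))
    (PySem.Dict.empty : PySem.Dict String (List String)) s
  rw [List.foldl_map] at h
  simp only [h, List.filter_map, PySem.Dict.getD_empty, List.nil_append, List.map_map]
  simp [Function.comp_def]

-- ===== VERDICT (by name: the statement is the Claim_ definition above) =====
theorem cluster_species_spec : Claim_equal_cluster_species := by
  intro network spec_num code_dict trans_bool _ _
  unfold Spec_cluster_species cluster_species cluster_species_alt
  rw [PySem.List.foldl_pyRange_zero_pyGetD spec_num ""
      (fun final_out s =>
        final_out ++ [if trans_bool then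
          (PySem.List.sorted (network.filter (fun n => speciesKey n == s)) (fun x => x) false).map
            (fun k => translate_genes k code_dict)
        else PySem.List.sorted (network.filter (fun n => speciesKey n == s)) (fun x => x) false]) []]
  rw [PySem.List.foldl_append_singleton_eq_map]
  simp only [List.nil_append, bucket_getD]
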